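-- pv_equiv track=rewrite | github.com/udahar/PakMan | packages/PromptLibrary/vetting.py | _get_passed_checks
-- ===== SOURCE A (Python) =====
-- from typing import List, Dict, Optional, Any, Tuple
--
-- def _get_passed_checks(issues: List[str], warnings: List[str]) -> List[str]:
--     """List passed checks."""
--     passed = []
--
--     if not any("Reject" in i for i in issues):
--         passed.append("No rejection patterns found")
--
--     if not any("security" in i.lower() or "bypass" in i.lower() for i in issues):
--         passed.append("No security issues detected")
--
--     if not any("hack" in i.lower() for i in issues):
--         passed.append("No hacking patterns detected")
--
--     return passed
-- ===== SOURCE B (Python) =====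
-- def _get_passed_checks(issues, warnings):
--     """List passed checks — single pass over issues maintaining three flags."""
--     found_reject = found_security = found_hack = False
--     for i in issues:
--         low = i.lower()
--         if "Reject" in i:
--             found_reject = True
--         if "security" in low or "bypass" in low:
--             found_security = True
--         if "hack" in low:
--             found_hack = True
--     passed = []
--     if not found_reject:
--         passed.append("No rejection patterns found")
--     if not found_security:
--         passed.append("No security issues detected")
--     if not found_hack:
--         passed.append("No hacking patterns detected")
--     return passed
-- ===== Notes on version B (the rewrite author's own statement) =====
-- stated objective: faster
-- what changed: Replaces three separate any(...) scans over issues (each lowering every string again) with one pass that maintains three boolean flags and lowers each issue once, then emits the messages from the flags.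
import Mathlib
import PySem

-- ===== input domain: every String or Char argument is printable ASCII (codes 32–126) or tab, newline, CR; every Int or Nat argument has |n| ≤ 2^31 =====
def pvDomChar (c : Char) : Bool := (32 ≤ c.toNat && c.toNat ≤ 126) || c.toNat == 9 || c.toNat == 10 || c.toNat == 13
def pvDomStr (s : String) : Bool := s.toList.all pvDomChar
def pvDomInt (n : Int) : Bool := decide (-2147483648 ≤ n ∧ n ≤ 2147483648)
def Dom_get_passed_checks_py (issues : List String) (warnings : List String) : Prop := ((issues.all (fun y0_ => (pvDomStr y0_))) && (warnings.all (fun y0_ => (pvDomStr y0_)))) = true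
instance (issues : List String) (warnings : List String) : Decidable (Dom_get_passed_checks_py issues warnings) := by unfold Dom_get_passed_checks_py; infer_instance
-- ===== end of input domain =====

-- B replaces A's three separate any-scans over issues with one single pass maintaining three boolean flags (objective: simpler).


-- ===== PORT A =====
def get_passed_checks_py (issues : List String) (warnings : List String) : List String :=
  let passed : List String := []
  let passed := if !(issues.any (fun i => PySem.Str.isIn "Reject" i)) then
      passed ++ ["No rejection patterns found"] else passed
  let passed := if !(issues.any (fun i =>
      PySem.Str.isIn "security" (PySem.Str.lower i) || PySem.Str.isIn "bypass" (PySem.Str.lower i))) then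
      passed ++ ["No security issues detected"] else passed
  let passed := if !(issues.any (fun i => PySem.Str.isIn "hack" (PySem.Str.lower i))) then
      passed ++ ["No hacking patterns detected"] else passed
  passed

-- ===== PORT B =====
def get_passed_checks_py_alt_step (st : Bool × Bool × Bool) (i : String) : Bool × Bool × Bool :=
  let low := PySem.Str.lower i
  ((st.1 || PySem.Str.isIn "Reject" i),
   (st.2.1 || (PySem.Str.isIn "security" low || PySem.Str.isIn "bypass" low)),
   (st.2.2 || PySem.Str.isIn "hack" low))

def get_passed_checks_py_alt (issues : List String) (warnings : List String) : List String :=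
  let st := issues.foldl get_passed_checks_py_alt_step (false, false, false)
  let passed : List String := []
  let passed := if !st.1 then passed ++ ["No rejection patterns found"] else passed
  let passed := if !st.2.1 then passed ++ ["No security issues detected"] else passed
  let passed := if !st.2.2 then passed ++ ["No hacking patterns detected"] else passed
  passed

-- ===== PRECONDITION & SPEC =====
def Spec_get_passed_checks_py (issues : List String) (warnings : List String) (out : List String) : Prop := out = get_passed_checks_py_alt issues warnings
instance (issues : List String) (warnings : List String) (out : List String) : Decidable (Spec_get_passed_checks_py issues warnings out) := by unfold Spec_get_passed_checks_py; infer_instance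

-- ===== CLAIM (what is proved, stated in full; the proofs are below) =====
def Claim_equal_get_passed_checks_py : Prop := ∀ (issues : List String) (warnings : List String), Dom_get_passed_checks_py issues warnings → Spec_get_passed_checks_py issues warnings (get_passed_checks_py issues warnings)

-- ===== LEMMAS AND PROOFS =====

-- The single-pass flag fold computes exactly the three any-scans of A.
theorem get_passed_checks_flags (issues : List String) (a b c : Bool) :
    issues.foldl get_passed_checks_py_alt_step (a, b, c) =
      (a || issues.any (fun i => PySem.Str.isIn "Reject" i),
       b || issues.any (fun i =>
         PySem.Str.isIn "security" (PySem.Str.lower i) || PySem.Str.isIn "bypass" (PySem.Str.lower i)),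
       c || issues.any (fun i => PySem.Str.isIn "hack" (PySem.Str.lower i))) := by
  induction issues generalizing a b c with
  | nil => simp
  | cons x t ih =>
    simp only [List.foldl_cons, List.any_cons]
    rw [get_passed_checks_py_alt_step, ih]
    simp [Bool.or_assoc]

-- ===== VERDICT (by name: the statement is the Claim_ definition above) =====
theorem get_passed_checks_py_spec : Claim_equal_get_passed_checks_py := by
  intro issues warnings _
  unfold Spec_get_passed_checks_py get_passed_checks_py get_passed_checks_py_alt
  rw [get_passed_checks_flags]
  simp
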